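-- pv_equiv track=rewrite | github.com/lsst-sqre/nublado | controller/src/controller/models/domain/arch_filter.py | filter_arch_tags
-- ===== SOURCE A (Python) =====
-- _ARCHITECTURES = ["arm64", "amd64"]
--
-- def filter_arch_tags(tags: list[str]) -> list[str]:
--     """Architecture-specific tags end in "-{arch}".
--
--     If we encounter one of those, and there is a tag that matches it up
--     to the suffix, we discard the architecture-specific tag.
--
--     Parameters
--     ----------
--     tags
--         Input tags.
--
--     Returns
--     -------
--     list[str]
--         Tags after architecture-specific filtering.
--
--     Notes
--     -----
--     This function is only directly useful to the Docker driver, which works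
--     on tags. The GAR driver works on RSPImages instead; it relies on this
--     function for its corresponding filter function (see below).
--     """
--     arches = [f"-{x}" for x in _ARCHITECTURES]
--     tag_set = set(tags)  # O(1) lookup instead of O(n)
--     filtered: list[str] = []
--
--     for tag in tags:
--         # Check if this is an arch-specific tag
--         arch_suffix = next((a for a in arches if tag.endswith(a)), None)
--
--         if arch_suffix is None:
--             # Not arch-specific, always include
--             filtered.append(tag)
--         else:
--             # Only include if base tag doesn't exist
--             base_tag = tag[: -len(arch_suffix)]
--             if base_tag not in tag_set:
--                 filtered.append(tag)
--
--     return filtered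
-- ===== SOURCE B (Python) =====
-- _ARCHITECTURES = ["arm64", "amd64"]
--
-- def filter_arch_tags(tags: list[str]) -> list[str]:
--     """Forward construction: build the set of arch-specific names shadowed by an
--     existing base tag (base + "-" + arch for every tag), then keep the tags that
--     are not in that set. No suffix probing/stripping at all."""
--     shadowed = {f"{t}-{a}" for t in tags for a in _ARCHITECTURES}
--     return [t for t in tags if t not in shadowed]
-- ===== Notes on version B (the rewrite author's own statement) =====
-- stated objective: alternative
-- what changed: Inverts the direction of the check: instead of probing each tag for an arch suffix and stripping it to look up the base, B constructs from every tag its derived arch-specific names (tag + '-' + arch) into a shadow set and keeps exactly the tags not in that set.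
import Mathlib
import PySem

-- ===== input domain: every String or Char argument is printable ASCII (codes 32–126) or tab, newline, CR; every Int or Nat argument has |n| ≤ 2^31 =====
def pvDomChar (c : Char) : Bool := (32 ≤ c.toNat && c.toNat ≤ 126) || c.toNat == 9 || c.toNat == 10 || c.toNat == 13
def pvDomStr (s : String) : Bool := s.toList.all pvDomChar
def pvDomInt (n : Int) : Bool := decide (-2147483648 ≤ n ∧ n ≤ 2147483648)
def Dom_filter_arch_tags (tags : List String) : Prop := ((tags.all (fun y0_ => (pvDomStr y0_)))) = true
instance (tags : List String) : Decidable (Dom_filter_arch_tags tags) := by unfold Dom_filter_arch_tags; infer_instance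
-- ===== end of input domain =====

-- B inverts the direction of the check: instead of probing each tag for an arch suffix and
-- stripping it, it builds the set of arch-specific names derived from every tag (tag + "-" + arch)
-- and keeps the tags not in that shadow set (alternative algorithm, same cost).

-- module constant _ARCHITECTURES, shared by both ports
def pvARCHITECTURES : List String := ["arm64", "amd64"]

-- ===== PORT A =====
def filter_arch_tags (tags : List String) : List String :=
  let arches := pvARCHITECTURES.map (fun x => "-" ++ x)
  let tagSet := PySem.Set.ofList tags
  tags.foldl (fun filtered tag =>
    match arches.find? (fun a => PySem.Str.endswith tag a) with
    | none => filtered ++ [tag]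
    | some archSuffix =>
      let baseTag := PySem.Str.slice tag none (some (-(PySem.Str.len archSuffix)))
      if !(PySem.Set.contains tagSet baseTag) then filtered ++ [tag] else filtered) []

-- ===== PORT B =====
def filter_arch_tags_alt (tags : List String) : List String :=
  let shadowed : PySem.Set String :=
    tags.foldl (fun s t =>
      pvARCHITECTURES.foldl (fun s a => PySem.Set.add s (t ++ "-" ++ a)) s) PySem.Set.empty
  tags.filter (fun t => !(PySem.Set.contains shadowed t))

-- ===== PRECONDITION & SPEC =====
def Spec_filter_arch_tags (tags : List String) (out : List String) : Prop := out = filter_arch_tags_alt tags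
instance (tags : List String) (out : List String) : Decidable (Spec_filter_arch_tags tags out) := by unfold Spec_filter_arch_tags; infer_instance

-- ===== CLAIM =====
def Claim_equal_filter_arch_tags : Prop := ∀ (tags : List String), Dom_filter_arch_tags tags → Spec_filter_arch_tags tags (filter_arch_tags tags)

-- ===== LEMMAS AND PROOFS =====

-- "tag ends with suffix a and its stripped base is in S" (A's removal test for one suffix)
def pvCond (S : PySem.Set String) (t a : String) : Bool :=
  PySem.Str.endswith t a &&
    PySem.Set.contains S (PySem.Str.slice t none (some (-(PySem.Str.len a))))

-- "A drops the tag"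
def pvC (S : PySem.Set String) (t : String) : Bool :=
  pvCond S t "-arm64" || pvCond S t "-amd64"

-- a string cannot end with both arch suffixes
theorem pv_not_both (t : String) :
    ¬(PySem.Str.endswith t "-arm64" = true ∧ PySem.Str.endswith t "-amd64" = true) := by
  rintro ⟨h1, h2⟩
  rw [PySem.Str.endswith_eq, PySem.Chars.endswith_iff] at h1 h2
  obtain ⟨s1, e1⟩ := h1
  obtain ⟨s2, e2⟩ := h2
  have e : s1 ++ ("-arm64" : String).toList = s2 ++ ("-amd64" : String).toList := e1.trans e2.symm
  have hlen : s1.length = s2.length := by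
    have := congrArg List.length e
    simp at this
    omega
  have := (List.append_inj e hlen).2
  exact absurd this (by decide)

-- A's loop body is "append tag unless pvC"
theorem pv_bodyA (S : PySem.Set String) (acc : List String) (t : String) :
    (match (pvARCHITECTURES.map (fun x => "-" ++ x)).find? (fun a => PySem.Str.endswith t a) with
     | none => acc ++ [t]
     | some archSuffix =>
        if !(PySem.Set.contains S (PySem.Str.slice t none (some (-(PySem.Str.len archSuffix))))) then
          acc ++ [t]
        else acc)
    = if !(pvC S t) then acc ++ [t] else acc := by
  by_cases h1 : PySem.Str.endswith t "-arm64" = true <;>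
    by_cases h2 : PySem.Str.endswith t "-amd64" = true
  · exact absurd ⟨h1, h2⟩ (pv_not_both t)
  all_goals simp_all [pvARCHITECTURES, List.find?, pvC, pvCond]

-- A's whole fold is a filter by pvC
theorem pv_foldlA (S : PySem.Set String) (l : List String) (acc : List String) :
    l.foldl (fun filtered tag =>
      match (pvARCHITECTURES.map (fun x => "-" ++ x)).find? (fun a => PySem.Str.endswith tag a) with
      | none => filtered ++ [tag]
      | some archSuffix =>
        if !(PySem.Set.contains S (PySem.Str.slice tag none (some (-(PySem.Str.len archSuffix))))) then
          filtered ++ [tag]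
        else filtered) acc
    = acc ++ l.filter (fun t => !(pvC S t)) := by
  induction l generalizing acc with
  | nil => simp
  | cons hd tl ih =>
    rw [List.foldl_cons, pv_bodyA]
    by_cases h : pvC S hd = true
    · rw [if_neg (by simp [h]), ih, List.filter_cons]
      simp [h]
    · rw [if_pos (by simp [h]), ih, List.filter_cons]
      simp [h]

theorem filter_arch_tags_eq_filter (tags : List String) :
    filter_arch_tags tags = tags.filter (fun t => !(pvC (PySem.Set.ofList tags) t)) := by
  have h := pv_foldlA (PySem.Set.ofList tags) tags []
  rw [List.nil_append] at h
  exact h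

-- the stripped base of "b ++ suf" is b (Python's tag[:-len(suf)])
theorem pv_slice_append (b suf : String) (hk : 0 < suf.toList.length) :
    PySem.Str.slice (b ++ suf) none (some (-(PySem.Str.len suf))) = b := by
  apply String.toList_inj.mp
  rw [PySem.Str.toList_slice, PySem.Chars.slice_eq_listSlice, PySem.Str.len_eq,
    PySem.List.slice_to_neg_natCast _ _ hk, String.toList_append]
  simp

-- A's one-suffix removal test characterised: t is some existing base tag plus suf
theorem pv_cond_iff (tags : List String) (t suf : String) (hk : 0 < suf.toList.length) :
    pvCond (PySem.Set.ofList tags) t suf = true ↔ ∃ b ∈ tags, t = b ++ suf := by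
  unfold pvCond
  rw [Bool.and_eq_true, PySem.Set.contains_iff, PySem.Set.mem_ofList,
    PySem.Str.endswith_eq, PySem.Chars.endswith_iff]
  constructor
  · rintro ⟨⟨pre, hpre⟩, hmem⟩
    refine ⟨PySem.Str.slice t none (some (-(PySem.Str.len suf))), hmem, ?_⟩
    apply String.toList_inj.mp
    rw [String.toList_append, PySem.Str.toList_slice, PySem.Chars.slice_eq_listSlice,
      PySem.Str.len_eq, PySem.List.slice_to_neg_natCast _ _ hk, ← hpre]
    simp
  · rintro ⟨b, hb, rfl⟩
    rw [pv_slice_append b suf hk]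
    exact ⟨⟨b.toList, (String.toList_append).symm⟩, hb⟩

-- membership in B's shadow set
theorem pv_mem_shadow (l : List String) (rem : PySem.Set String) (x : String) :
    x ∈ l.foldl (fun s t =>
        pvARCHITECTURES.foldl (fun s a => PySem.Set.add s (t ++ "-" ++ a)) s) rem
      ↔ x ∈ rem ∨ ∃ b ∈ l, x = b ++ "-arm64" ∨ x = b ++ "-amd64" := by
  induction l generalizing rem with
  | nil => simp
  | cons hd tl ih =>
    rw [List.foldl_cons, ih]
    have e1 : ("-" ++ "arm64" : String) = "-arm64" := by decide
    have e2 : ("-" ++ "amd64" : String) = "-amd64" := by decide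
    have h1 : hd ++ "-" ++ "arm64" = hd ++ "-arm64" := by rw [String.append_assoc, e1]
    have h2 : hd ++ "-" ++ "amd64" = hd ++ "-amd64" := by rw [String.append_assoc, e2]
    simp only [pvARCHITECTURES, List.foldl, PySem.Set.mem_add, h1, h2, List.mem_cons]
    aesop

-- ===== VERDICT =====
theorem filter_arch_tags_spec : Claim_equal_filter_arch_tags := by
  intro tags _
  unfold Spec_filter_arch_tags filter_arch_tags_alt
  rw [filter_arch_tags_eq_filter]
  refine (List.filter_congr ?_).symm
  intro t _
  congr 1
  have hiff : (PySem.Set.contains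
      (tags.foldl (fun s t =>
        pvARCHITECTURES.foldl (fun s a => PySem.Set.add s (t ++ "-" ++ a)) s) PySem.Set.empty) t
      = true) ↔ pvC (PySem.Set.ofList tags) t = true := by
    rw [PySem.Set.contains_iff, pv_mem_shadow, pvC, Bool.or_eq_true,
      pv_cond_iff tags t "-arm64" (by decide), pv_cond_iff tags t "-amd64" (by decide)]
    simp only [PySem.Set.empty, List.not_mem_nil, false_or]
    aesop
  by_cases hc : pvC (PySem.Set.ofList tags) t = true
  · rw [hc, hiff.mpr hc]
  · rw [Bool.not_eq_true] at hc
    rw [hc, Bool.eq_false_iff]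
    intro h
    exact absurd (hiff.mp h) (by simp [hc])
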